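-- pv_equiv track=rewrite | github.com/joistick11/edison-car | main_map.py | convert_absolute_to_relative_action_chain
-- ===== SOURCE A (Python) =====
-- import operator
--
-- def convert_absolute_to_relative_action_chain(absolute_action_chain):
--     # calculate relative directions
--     directions = list(map(operator.itemgetter(0), absolute_action_chain))
--     current_abs = directions.pop(0)
--     relative_action_chain = ['forward']
--     while len(directions) > 0:
--         candidate_abs = directions.pop(0)
--         relative_action_chain.append(calculate_relative_with_new_abs(current_abs, candidate_abs))
--         current_abs = candidate_abs
--
--     # append relative directions with length
--     return list(map(lambda item: (item[1][0], item[0][1]), zip(absolute_action_chain, relative_action_chain)))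
--
-- def calculate_relative_with_new_abs(current_abs, candidate_abs):
--     if current_abs == 'u':
--         if candidate_abs == 'l':
--             return 'left'
--         elif candidate_abs == 'r':
--             return 'right'
--     elif current_abs == 'r':
--         if candidate_abs == 'u':
--             return 'left'
--         elif candidate_abs == 'd':
--             return 'right'
--     elif current_abs == 'd':
--         if candidate_abs == 'r':
--             return 'left'
--         elif candidate_abs == 'l':
--             return 'right'
--     elif current_abs == 'l':
--         if candidate_abs == 'u':
--             return 'right'
--         elif candidate_abs == 'd':
--             return 'left'
-- ===== SOURCE B (Python) =====
-- def convert_absolute_to_relative_action_chain(absolute_action_chain):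
--     idx = {'u': 0, 'r': 1, 'd': 2, 'l': 3}
--     out = [('f', absolute_action_chain[0][1])]
--     for (prev, _), (cur, n) in zip(absolute_action_chain, absolute_action_chain[1:]):
--         d = (idx[cur] - idx[prev]) % 4
--         out.append(('r' if d == 1 else 'l', n))
--     return out
-- ===== Notes on version B (the rewrite author's own statement) =====
-- stated objective: faster
-- what changed: Replaced the destructive pop(0) loop plus 16-branch direction table and final zip/map post-pass by a single pass over consecutive pairs that maps directions to positions on a clockwise cycle and computes the turn as (cand-cur) % 4.
import Mathlib
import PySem

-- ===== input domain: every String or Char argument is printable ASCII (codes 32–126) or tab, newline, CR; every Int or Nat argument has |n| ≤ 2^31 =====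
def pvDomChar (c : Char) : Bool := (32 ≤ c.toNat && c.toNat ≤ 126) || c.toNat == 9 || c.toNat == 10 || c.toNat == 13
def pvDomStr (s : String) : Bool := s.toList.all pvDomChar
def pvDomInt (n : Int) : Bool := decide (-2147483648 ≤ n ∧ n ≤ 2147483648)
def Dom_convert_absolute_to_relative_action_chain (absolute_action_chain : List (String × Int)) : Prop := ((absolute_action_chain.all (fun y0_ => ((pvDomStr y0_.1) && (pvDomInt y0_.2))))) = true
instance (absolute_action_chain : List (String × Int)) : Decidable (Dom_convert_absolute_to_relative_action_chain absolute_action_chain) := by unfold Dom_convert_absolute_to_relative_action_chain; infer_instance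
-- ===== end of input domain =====

-- B replaces A's quadratic pop(0) loop + 16-branch table + final zip/map by one linear pass
-- computing each turn as a difference modulo 4 on a clockwise cycle (measured faster).

-- ===== PORT A =====
-- calculate_relative_with_new_abs; falling off the end returns Python None = none
def calculate_relative_with_new_abs (current_abs candidate_abs : String) : Option String :=
  if current_abs = "u" then
    if candidate_abs = "l" then some "left"
    else if candidate_abs = "r" then some "right"
    else none
  else if current_abs = "r" then
    if candidate_abs = "u" then some "left"
    else if candidate_abs = "d" then some "right"
    else none
  else if current_abs = "d" then
    if candidate_abs = "r" then some "left"
    else if candidate_abs = "l" then some "right"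
    else none
  else if current_abs = "l" then
    if candidate_abs = "u" then some "right"
    else if candidate_abs = "d" then some "left"
    else none
  else none

-- the while loop: pop(0) from directions, append the computed relative action
def pvALoop (current_abs : String) (directions : List String)
    (relative_action_chain : List (Option String)) : List (Option String) :=
  match directions with
  | [] => relative_action_chain
  | candidate_abs :: rest =>
      pvALoop candidate_abs rest
        (relative_action_chain ++ [calculate_relative_with_new_abs current_abs candidate_abs])

-- item[1][0] : first character of the relative action; when item[1] is None Python raises
-- TypeError — there the port yields "" (such inputs are excluded by Pre_)
def pvACharOf (r : Option String) : String :=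
  match r.bind (fun s => PySem.Str.pyGet? s 0) with
  | some c => String.ofList [c]
  | none => ""

def convert_absolute_to_relative_action_chain (absolute_action_chain : List (String × Int)) : List (String × Int) :=
  match absolute_action_chain.map Prod.fst with
  | [] => []  -- Python: directions.pop(0) raises IndexError (excluded by Pre_)
  | current_abs :: directions =>
      let relative_action_chain := pvALoop current_abs directions [some "forward"]
      (absolute_action_chain.zip relative_action_chain).map
        (fun item => (pvACharOf item.2, item.1.2))

-- ===== PORT B =====
def pvBIdx : PySem.Dict String Int :=
  (((PySem.Dict.empty.insert "u" 0).insert "r" 1).insert "d" 2).insert "l" 3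

-- idx[s]; Python raises KeyError for an unknown direction — the port yields 0 there
-- (such inputs are excluded by Pre_)
def pvBGet (s : String) : Int := (pvBIdx.get? s).getD 0

def convert_absolute_to_relative_action_chain_alt (absolute_action_chain : List (String × Int)) : List (String × Int) :=
  match absolute_action_chain with
  | [] => []  -- Python: absolute_action_chain[0] raises IndexError (excluded by Pre_)
  | (_, n0) :: tail =>
      ("f", n0) ::
        (absolute_action_chain.zip tail).map (fun p =>
          (if PySem.Int.mod (pvBGet p.2.1 - pvBGet p.1.1) 4 = 1 then "r" else "l", p.2.2))

-- ===== PRECONDITION & SPEC =====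
-- Pre_ excludes exactly the inputs where A raises: the empty chain (IndexError from pop(0))
-- and chains with a consecutive pair that is not a quarter turn, including unknown direction
-- strings (TypeError from None[0]).
def pvTurnOKb (a b : String) : Bool :=
  [("u","l"),("u","r"),("r","u"),("r","d"),("d","r"),("d","l"),("l","u"),("l","d")].contains (a, b)

def Pre_convert_absolute_to_relative_action_chain (absolute_action_chain : List (String × Int)) : Prop :=
  absolute_action_chain ≠ [] ∧
    (((absolute_action_chain.map Prod.fst).zip (absolute_action_chain.map Prod.fst).tail).all
      (fun p => pvTurnOKb p.1 p.2)) = true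

instance (absolute_action_chain : List (String × Int)) : Decidable (Pre_convert_absolute_to_relative_action_chain absolute_action_chain) := by
  unfold Pre_convert_absolute_to_relative_action_chain; infer_instance

def pvWitness_convert_absolute_to_relative_action_chain : (List (String × Int)) :=
  [("u", 3), ("r", 2), ("d", 1)]

def Spec_convert_absolute_to_relative_action_chain (absolute_action_chain : List (String × Int)) (out : List (String × Int)) : Prop := out = convert_absolute_to_relative_action_chain_alt absolute_action_chain
instance (absolute_action_chain : List (String × Int)) (out : List (String × Int)) : Decidable (Spec_convert_absolute_to_relative_action_chain absolute_action_chain out) := by unfold Spec_convert_absolute_to_relative_action_chain; infer_instance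

-- ===== CLAIM (what is proved, stated in full; the proofs are below) =====
def Claim_equal_convert_absolute_to_relative_action_chain : Prop := ∀ (absolute_action_chain : List (String × Int)), Dom_convert_absolute_to_relative_action_chain absolute_action_chain → Pre_convert_absolute_to_relative_action_chain absolute_action_chain → Spec_convert_absolute_to_relative_action_chain absolute_action_chain (convert_absolute_to_relative_action_chain absolute_action_chain)

-- ===== LEMMAS AND PROOFS =====

-- relSeq: the per-pair relative actions produced by A's loop, without the accumulator
def pvRelSeq (current : String) (ds : List String) : List (Option String) :=
  match ds with
  | [] => []
  | c :: rest => calculate_relative_with_new_abs current c :: pvRelSeq c rest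

theorem pvALoop_eq (ds : List String) : ∀ (cur : String) (acc : List (Option String)),
    pvALoop cur ds acc = acc ++ pvRelSeq cur ds := by
  induction ds with
  | nil => intro cur acc; simp [pvALoop, pvRelSeq]
  | cons c rest ih =>
      intro cur acc
      simp [pvALoop, pvRelSeq, ih]

-- the per-pair agreement: on a valid quarter turn, A's character equals B's mod-4 result
theorem pvPair_eq (a b : String) (h : pvTurnOKb a b = true) :
    pvACharOf (calculate_relative_with_new_abs a b)
      = (if PySem.Int.mod (pvBGet b - pvBGet a) 4 = 1 then "r" else "l") := by
  have hm : (a, b) ∈ [("u","l"),("u","r"),("r","u"),("r","d"),("d","r"),("d","l"),("l","u"),("l","d")] := by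
    simpa [pvTurnOKb] using h
  fin_cases hm <;> decide

-- the zipped tails agree
theorem pvTail_eq : ∀ (rest : List (String × Int)) (s0 : String) (n0 : Int),
    (((s0 :: rest.map Prod.fst).zip (rest.map Prod.fst)).all (fun p => pvTurnOKb p.1 p.2)) = true →
    (rest.zip (pvRelSeq s0 (rest.map Prod.fst))).map (fun item => (pvACharOf item.2, item.1.2))
      = (((s0, n0) :: rest).zip rest).map (fun p =>
          (if PySem.Int.mod (pvBGet p.2.1 - pvBGet p.1.1) 4 = 1 then "r" else "l", p.2.2)) := by
  intro rest
  induction rest with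
  | nil => intro s0 n0 _; rfl
  | cons hd tl ih =>
      intro s0 n0 hch
      obtain ⟨s1, n1⟩ := hd
      simp only [List.map_cons, List.zip_cons_cons, List.all_cons, Bool.and_eq_true] at hch
      simp only [pvRelSeq, List.zip_cons_cons, List.map_cons]
      rw [pvPair_eq s0 s1 hch.1, ih s1 n1 hch.2]

theorem convert_absolute_to_relative_action_chain_spec : Claim_equal_convert_absolute_to_relative_action_chain := by
  intro xs _ hpre
  obtain ⟨hne, hch⟩ := hpre
  unfold Spec_convert_absolute_to_relative_action_chain
  match xs with
  | [] => exact absurd rfl hne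
  | (s0, n0) :: rest =>
      unfold convert_absolute_to_relative_action_chain convert_absolute_to_relative_action_chain_alt
      simp only [List.map_cons]
      rw [pvALoop_eq]
      simp only [List.cons_append, List.nil_append, List.zip_cons_cons, List.map_cons]
      simp only [List.map_cons, List.tail_cons] at hch
      rw [pvTail_eq rest s0 n0 hch]
      rfl
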